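-- pv_equiv track=rewrite | github.com/XIAOMANSDK/B6x | xm_b6_mcp/src/common/peripheral_utils.py | get_peripheral_type_from_name
-- ===== SOURCE A (Python) =====
-- from typing import Optional, List, Dict, Set
--
-- PERIPHERAL_API_MAP: Dict[str, str] = {
--     "UART": "uart_init",
--     "USART": "uart_init",
--     "I2C": "i2c_init",
--     "SPI": "spim_init",
--     "SPIM": "spim_init",
--     "SPIS": "spis_init",
--     "DMA": "dma_init",
--     "TIMER": "ctmr_init",
--     "TIM": "ctmr_init",
--     "CTMR": "ctmr_init",
--     "EXTI": "exti_init",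
--     "PWM": "pwm_init",
--     "GPIO": "gpio_init",
--     "ADC": "adc_init",
--     "DAC": "dac_init",
--     "RTC": "rtc_init",
--     "WDT": "wdt_init",
--     "FLASH": "flash_init",
-- }
--
-- def get_peripheral_type_from_name(periph_name: str) -> Optional[str]:
--     """
--     Extract the peripheral type from a full name.
--
--     Args:
--         periph_name: Full peripheral name
--                     Examples: "UART1", "SPI2", "GPIOA"
--
--     Returns:
--         Peripheral type (e.g., "UART", "SPI") or None if not recognized
--     """
--     if not periph_name:
--         return None
--
--     # Normalize: uppercase and strip trailing digits/letters
--     periph_upper = periph_name.upper()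
--
--     # Try exact match first
--     if periph_upper in PERIPHERAL_API_MAP:
--         return periph_upper
--
--     # Try stripping trailing characters (UART1 -> UART)
--     for i in range(len(periph_upper) - 1, 0, -1):
--         candidate = periph_upper[:i]
--         if candidate in PERIPHERAL_API_MAP:
--             return candidate
--
--     return None
-- ===== SOURCE B (Python) =====
-- from typing import Optional, List, Dict, Set
--
-- PERIPHERAL_API_MAP: Dict[str, str] = {
--     "UART": "uart_init",
--     "USART": "uart_init",
--     "I2C": "i2c_init",
--     "SPI": "spim_init",
--     "SPIM": "spim_init",
--     "SPIS": "spis_init",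
--     "DMA": "dma_init",
--     "TIMER": "ctmr_init",
--     "TIM": "ctmr_init",
--     "CTMR": "ctmr_init",
--     "EXTI": "exti_init",
--     "PWM": "pwm_init",
--     "GPIO": "gpio_init",
--     "ADC": "adc_init",
--     "DAC": "dac_init",
--     "RTC": "rtc_init",
--     "WDT": "wdt_init",
--     "FLASH": "flash_init",
-- }
--
-- def get_peripheral_type_from_name(periph_name: str) -> Optional[str]:
--     """Longest key of PERIPHERAL_API_MAP that the uppercased name starts with."""
--     if not periph_name:
--         return None
--     periph_upper = periph_name.upper()
--     best = None
--     for key in PERIPHERAL_API_MAP: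
--         if periph_upper.startswith(key) and (best is None or len(key) > len(best)):
--             best = key
--     return best
-- ===== Notes on version B (the rewrite author's own statement) =====
-- stated objective: faster
-- what changed: A probes ever-shorter slices of the name against the dict (exact match, then a decreasing-length slice loop with early return); B makes one pass over the fixed key set with a startswith test, keeping a running longest-match accumulator, so no slices of the input are ever built.
import Mathlib
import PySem

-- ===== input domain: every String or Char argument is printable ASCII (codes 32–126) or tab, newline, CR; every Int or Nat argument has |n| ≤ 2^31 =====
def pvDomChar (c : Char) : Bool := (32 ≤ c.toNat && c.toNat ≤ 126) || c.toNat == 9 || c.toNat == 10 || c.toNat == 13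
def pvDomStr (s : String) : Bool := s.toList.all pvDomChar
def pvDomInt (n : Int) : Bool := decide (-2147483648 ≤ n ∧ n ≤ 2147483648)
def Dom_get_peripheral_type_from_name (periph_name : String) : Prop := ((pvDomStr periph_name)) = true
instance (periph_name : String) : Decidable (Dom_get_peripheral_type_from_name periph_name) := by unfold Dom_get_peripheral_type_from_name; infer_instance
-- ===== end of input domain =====

-- B replaces A's decreasing-slice probing loop by a single pass over the fixed key set
-- with a startswith test and a running longest-match accumulator (objective: faster).

-- ===== PORT A =====
def pvMap : PySem.Dict String String := PySem.Dict.ofList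
  [("UART", "uart_init"), ("USART", "uart_init"), ("I2C", "i2c_init"),
   ("SPI", "spim_init"), ("SPIM", "spim_init"), ("SPIS", "spis_init"),
   ("DMA", "dma_init"), ("TIMER", "ctmr_init"), ("TIM", "ctmr_init"),
   ("CTMR", "ctmr_init"), ("EXTI", "exti_init"), ("PWM", "pwm_init"),
   ("GPIO", "gpio_init"), ("ADC", "adc_init"), ("DAC", "dac_init"),
   ("RTC", "rtc_init"), ("WDT", "wdt_init"), ("FLASH", "flash_init")]

-- the 'for i in range(len(periph_upper) - 1, 0, -1): …' loop with its early return
def pvALoopA (u : String) : List Int → Option String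
  | [] => none
  | i :: rest =>
    let candidate := PySem.Str.slice u none (some i)
    if pvMap.contains candidate then some candidate else pvALoopA u rest

def get_peripheral_type_from_name (periph_name : String) : Option String :=
  if PySem.Str.len periph_name = 0 then none
  else
    let periph_upper := PySem.Str.upper periph_name
    if pvMap.contains periph_upper then some periph_upper
    else pvALoopA periph_upper
      (PySem.List.pyRange ((PySem.Str.len periph_upper : Int) - 1) 0 (-1))

-- ===== PORT B =====
-- the 'best is None or len(key) > len(best)' test
def pvBeats (best : Option String) (key : String) : Bool :=
  match best with
  | none => true
  | some b => decide (PySem.Str.len b < PySem.Str.len key)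

-- the 'for key in PERIPHERAL_API_MAP: …' loop carrying the running best match
def pvBLoop (u : String) (best : Option String) : List String → Option String
  | [] => best
  | key :: rest =>
    pvBLoop u
      (if PySem.Str.startswith u key && pvBeats best key
       then some key else best) rest

def get_peripheral_type_from_name_alt (periph_name : String) : Option String :=
  if periph_name = "" then none
  else pvBLoop (PySem.Str.upper periph_name) none pvMap.keys

-- ===== PRECONDITION & SPEC =====
def Spec_get_peripheral_type_from_name (periph_name : String) (out : Option String) : Prop := out = get_peripheral_type_from_name_alt periph_name
instance (periph_name : String) (out : Option String) : Decidable (Spec_get_peripheral_type_from_name periph_name out) := by unfold Spec_get_peripheral_type_from_name; infer_instance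

-- ===== CLAIM (what is proved, stated in full; the proofs are below) =====
def Claim_equal_get_peripheral_type_from_name : Prop := ∀ (periph_name : String), Dom_get_peripheral_type_from_name periph_name → Spec_get_peripheral_type_from_name periph_name (get_peripheral_type_from_name periph_name)

-- ===== LEMMAS AND PROOFS =====

-- the key list (insertion order), as a literal
def pvKS : List String :=
  ["UART", "USART", "I2C", "SPI", "SPIM", "SPIS", "DMA", "TIMER", "TIM",
   "CTMR", "EXTI", "PWM", "GPIO", "ADC", "DAC", "RTC", "WDT", "FLASH"]

lemma pvKeys_eq : pvMap.keys = pvKS := by decide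

lemma pvMap_mk : pvMap = PySem.Dict.mk
  [("UART", "uart_init"), ("USART", "uart_init"), ("I2C", "i2c_init"),
   ("SPI", "spim_init"), ("SPIM", "spim_init"), ("SPIS", "spis_init"),
   ("DMA", "dma_init"), ("TIMER", "ctmr_init"), ("TIM", "ctmr_init"),
   ("CTMR", "ctmr_init"), ("EXTI", "exti_init"), ("PWM", "pwm_init"),
   ("GPIO", "gpio_init"), ("ADC", "adc_init"), ("DAC", "dac_init"),
   ("RTC", "rtc_init"), ("WDT", "wdt_init"), ("FLASH", "flash_init")] := by decide

lemma pvContains_iff (w : String) : pvMap.contains w = true ↔ w ∈ pvKS := by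
  rw [pvMap_mk]
  simp [PySem.Dict.contains_mk, pvKS]
  tauto

lemma pvKS_ne_nil : ∀ k ∈ pvKS, k.toList ≠ [] := by decide

lemma pv_startswith_iff (u k : String) :
    PySem.Str.startswith u k = true ↔ k.toList <+: u.toList := by
  rw [PySem.Str.startswith_eq]
  exact PySem.Chars.startswith_iff _ _

lemma pv_prefix_uniq {c : List Char} {k k' : String}
    (h : k.toList <+: c) (h' : k'.toList <+: c)
    (hl : k.toList.length = k'.toList.length) : k = k' :=
  String.toList_inj.mp ((List.prefix_of_prefix_length_le h h' hl.le).eq_of_length hl)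

lemma pv_take_eq_key_iff {c : List Char} {k : String} {j : Nat} (hj : j ≤ c.length) :
    c.take j = k.toList ↔ (k.toList <+: c ∧ k.toList.length = j) := by
  constructor
  · intro h
    refine ⟨h ▸ List.take_prefix j c, ?_⟩
    rw [← h, List.length_take]
    omega
  · rintro ⟨hp, hl⟩
    rw [List.prefix_iff_eq_take, hl] at hp
    exact hp.symm

lemma pv_slice_toList (u : String) (j : Nat) :
    (PySem.Str.slice u none (some (j : Int))).toList = u.toList.take j := by
  simp [PySem.List.slice_to_natCast]

-- descending index list [i, i-1, …, 1]
def pvDList (i : Nat) : List Int := (List.range i).map (fun (t : Nat) => (i : Int) - (t : Int))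

lemma pvDList_succ (i : Nat) : pvDList (i + 1) = ((i + 1 : Nat) : Int) :: pvDList i := by
  unfold pvDList
  rw [List.range_succ_eq_map, List.map_cons, List.map_map]
  refine congrArg₂ _ (by push_cast; ring) (List.map_congr_left ?_)
  intro t _
  simp only [Function.comp_apply, Nat.succ_eq_add_one]
  push_cast
  ring

lemma pv_pyRange_countdown (m : Nat) : PySem.List.pyRange (m : Int) 0 (-1) = pvDList m := by
  rcases Nat.eq_zero_or_pos m with hm | hm
  · subst hm; simp [PySem.List.pyRange, pvDList]
  · have h0 : (0 : Int) < (m : Int) := by exact_mod_cast hm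
    rw [PySem.List.pyRange]
    simp only [if_neg (by norm_num : ((-1 : Int)) ≠ 0), if_neg (by omega : ¬(0:Int) < -1), if_pos h0]
    have hcnt : (((m : Int) - 0 + -(-1) - 1) / -(-1)).toNat = m := by
      norm_num
    rw [hcnt]
    unfold pvDList
    apply List.map_congr_left
    intro t _
    ring

lemma pv_aloop_none (u : String) (i : Nat) (hi : i ≤ u.toList.length)
    (h : ∀ k ∈ pvKS, k.toList <+: u.toList → i < k.toList.length) :
    pvALoopA u (pvDList i) = none := by
  induction i with
  | zero => simp [pvDList, pvALoopA]
  | succ i ih =>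
    rw [pvDList_succ, pvALoopA]
    have hc : ¬ (pvMap.contains (PySem.Str.slice u none (some ((i + 1 : Nat) : Int))) = true) := by
      rw [pvContains_iff]
      intro hmem
      have htl := pv_slice_toList u (i + 1)
      have := (pv_take_eq_key_iff (k := PySem.Str.slice u none (some ((i + 1 : Nat) : Int)))
        (c := u.toList) (j := i + 1) hi).mp htl.symm
      have := h _ hmem this.1
      omega
    simp only [hc, if_false, Bool.false_eq_true]
    exact ih (by omega) (fun k hk hp => by have := h k hk hp; have hne := pvKS_ne_nil k hk
                                           have : 1 ≤ k.toList.length := List.length_pos_of_ne_nil hne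
                                           omega)

lemma pv_aloop_some (u : String) (i : Nat) (hi : i ≤ u.toList.length) (k0 : String)
    (hk0 : k0 ∈ pvKS) (hp0 : k0.toList <+: u.toList) (hl0 : k0.toList.length ≤ i)
    (hmax : ∀ k ∈ pvKS, k.toList <+: u.toList → k.toList.length ≤ i → k.toList.length ≤ k0.toList.length) :
    pvALoopA u (pvDList i) = some k0 := by
  induction i with
  | zero =>
    exfalso
    have := List.length_pos_of_ne_nil (pvKS_ne_nil k0 hk0)
    omega
  | succ i ih =>
    rw [pvDList_succ, pvALoopA]
    by_cases hc : pvMap.contains (PySem.Str.slice u none (some ((i + 1 : Nat) : Int))) = true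
    · have hmem := (pvContains_iff _).mp hc
      have htl := pv_slice_toList u (i + 1)
      have hkey := (pv_take_eq_key_iff (c := u.toList) (j := i + 1) hi).mp htl.symm
      have h1 : i + 1 ≤ k0.toList.length := hkey.2 ▸ hmax _ hmem hkey.1 (le_of_eq hkey.2)
      have hlen : k0.toList.length = i + 1 := by omega
      have : PySem.Str.slice u none (some ((i + 1 : Nat) : Int)) = k0 :=
        pv_prefix_uniq hkey.1 hp0 (by omega)
      simp only [hc, if_true]
      rw [this]
    · have hnot : ∀ k ∈ pvKS, k.toList <+: u.toList → k.toList.length ≠ i + 1 := by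
        intro k hk hp hlen
        apply hc
        rw [pvContains_iff]
        have : u.toList.take (i + 1) = k.toList :=
          (pv_take_eq_key_iff (c := u.toList) (j := i + 1) hi).mpr ⟨hp, hlen⟩
        have : PySem.Str.slice u none (some ((i + 1 : Nat) : Int)) = k := by
          apply String.toList_inj.mp
          rw [pv_slice_toList]; exact this
        rw [this]; exact hk
      simp only [hc, if_false, Bool.false_eq_true]
      have hl0' : k0.toList.length ≤ i := by
        have := hnot k0 hk0 hp0; omega
      exact ih (by omega) hl0'
        (fun k hk hp hle => hmax k hk hp (by omega))

-- Characterisation of the accumulator loop: either nothing in ks beats acc and the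
-- result is acc, or the result is a matching key of ks, maximal in ks and longer than acc.
lemma pv_bloop_spec (u : String) (ks : List String) :
    ∀ acc : Option String, (∀ b, acc = some b → b.toList <+: u.toList) →
    (pvBLoop u acc ks = acc ∧
       ∀ k ∈ ks, k.toList <+: u.toList → ∃ b, acc = some b ∧ k.toList.length ≤ b.toList.length) ∨
    (∃ k, pvBLoop u acc ks = some k ∧ k ∈ ks ∧ k.toList <+: u.toList ∧
       (∀ k' ∈ ks, k'.toList <+: u.toList → k'.toList.length ≤ k.toList.length) ∧
       (∀ b, acc = some b → b.toList.length < k.toList.length)) := by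
  induction ks with
  | nil => intro acc _; left; exact ⟨rfl, by simp⟩
  | cons key t ih =>
    intro acc hacc
    simp only [pvBLoop]
    by_cases hupd : (PySem.Str.startswith u key && pvBeats acc key) = true
    · -- key matches and beats acc: new accumulator is some key
      have hupd' := hupd
      rw [Bool.and_eq_true] at hupd'
      have hsw : PySem.Str.startswith u key = true := hupd'.1
      have hpk : key.toList <+: u.toList := (pv_startswith_iff u key).mp hsw
      have hlt : ∀ b, acc = some b → b.toList.length < key.toList.length := by
        intro b hb
        have := hupd'.2
        rw [hb] at this
        simpa [pvBeats, PySem.Str.len] using this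
      rw [if_pos hupd]
      rcases ih (some key) (by rintro b hb; cases hb; exact hpk) with ⟨hr, hbound⟩ | ⟨k2, hr, hm, hp2, hmax2, hgt2⟩
      · right
        refine ⟨key, hr, List.mem_cons_self, hpk, ?_, hlt⟩
        intro k' hk' hp'
        rcases List.mem_cons.mp hk' with rfl | hmem
        · exact le_refl _
        · rcases hbound k' hmem hp' with ⟨b, hb, hle⟩
          cases hb; exact hle
      · right
        have hkeylt : key.toList.length < k2.toList.length := hgt2 key rfl
        refine ⟨k2, hr, List.mem_cons_of_mem _ hm, hp2, ?_, ?_⟩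
        · intro k' hk' hp'
          rcases List.mem_cons.mp hk' with rfl | hmem
          · omega
          · exact hmax2 k' hmem hp'
        · intro b hb
          have := hlt b hb
          omega
    · -- accumulator unchanged
      rw [if_neg hupd]
      have hkey_bound : key.toList <+: u.toList →
          ∃ b, acc = some b ∧ key.toList.length ≤ b.toList.length := by
        intro hpk
        have hsw : PySem.Str.startswith u key = true := (pv_startswith_iff u key).mpr hpk
        cases hacc' : acc with
        | none => exfalso; apply hupd; rw [hacc']; simp only [pvBeats, Bool.and_true]; exact hsw
        | some b =>
          refine ⟨b, rfl, ?_⟩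
          by_contra hgt
          apply hupd
          rw [hacc']
          simp only [hsw, Bool.true_and, pvBeats, decide_eq_true_eq, PySem.Str.len]
          omega
      rcases ih acc hacc with ⟨hr, hbound⟩ | ⟨k2, hr, hm, hp2, hmax2, hgt2⟩
      · left
        refine ⟨hr, ?_⟩
        intro k hk hp
        rcases List.mem_cons.mp hk with rfl | hmem
        · exact hkey_bound hp
        · exact hbound k hmem hp
      · right
        refine ⟨k2, hr, List.mem_cons_of_mem _ hm, hp2, ?_, hgt2⟩
        intro k' hk' hp'
        rcases List.mem_cons.mp hk' with rfl | hmem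
        · rcases hkey_bound hp' with ⟨b, hb, hle⟩
          have := hgt2 b hb
          omega
        · exact hmax2 k' hmem hp'

lemma pv_len_upper (s : String) : (PySem.Str.upper s).toList.length = s.toList.length := by
  simp [PySem.Chars.upper]

-- ===== VERDICT (by name: the statement is the Claim_ definition above) =====
theorem get_peripheral_type_from_name_spec : Claim_equal_get_peripheral_type_from_name := by
  intro s _
  unfold Spec_get_peripheral_type_from_name
  unfold get_peripheral_type_from_name get_peripheral_type_from_name_alt
  by_cases hs : s = ""
  · subst hs; rfl
  · have hnil : s.toList ≠ [] := by
      intro h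
      exact hs (String.toList_inj.mp (by simp [h]))
    have hlen0 : ¬ (PySem.Str.len s = 0) := by
      simp only [PySem.Str.len]
      have := List.length_pos_of_ne_nil hnil
      omega
    rw [if_neg hlen0, if_neg hs]
    set u := PySem.Str.upper s with hu
    have hn : 1 ≤ u.toList.length := by
      rw [pv_len_upper]
      have := List.length_pos_of_ne_nil hnil
      omega
    rw [pvKeys_eq]
    rcases pv_bloop_spec u pvKS none (by simp) with ⟨hr, hbound⟩ | ⟨k, hr, hmem, hpk, hmaxk, _⟩
    · -- no key in pvKS is a prefix of u: both sides none
      have hall : ∀ k ∈ pvKS, ¬ k.toList <+: u.toList := by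
        intro k hk hp
        rcases hbound k hk hp with ⟨b, hb, _⟩
        simp at hb
      rw [hr]
      have hcu : ¬ (pvMap.contains u = true) := by
        rw [pvContains_iff]
        intro hmem
        exact hall u hmem (List.prefix_refl _)
      rw [if_neg hcu]
      have hlen : ((PySem.Str.len u : Int) - 1) = (((u.toList.length - 1 : Nat)) : Int) := by
        simp only [PySem.Str.len]
        omega
      rw [hlen, pv_pyRange_countdown]
      exact pv_aloop_none u (u.toList.length - 1) (by omega)
        (fun k hk hp => absurd hp (hall k hk))
    · -- k is the longest matching key: both sides some k
      rw [hr]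
      by_cases hcu : pvMap.contains u = true
      · have humem := (pvContains_iff u).mp hcu
        have huk : u = k := by
          have h1 : u.toList.length ≤ k.toList.length := hmaxk u humem (List.prefix_refl _)
          have h2 : k.toList.length ≤ u.toList.length := hpk.length_le
          exact pv_prefix_uniq (List.prefix_refl u.toList) hpk (by omega)
        rw [if_pos hcu, huk]
      · rw [if_neg hcu]
        have hlen : ((PySem.Str.len u : Int) - 1) = (((u.toList.length - 1 : Nat)) : Int) := by
          simp only [PySem.Str.len]
          omega
        rw [hlen, pv_pyRange_countdown]
        have hkne : k.toList.length ≠ u.toList.length := by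
          intro he
          apply hcu
          rw [pvContains_iff]
          have : k = u := pv_prefix_uniq hpk (List.prefix_refl _) (by simpa using he)
          exact this ▸ hmem
        have hkle : k.toList.length ≤ u.toList.length - 1 := by
          have := hpk.length_le; omega
        exact pv_aloop_some u (u.toList.length - 1) (by omega) k hmem hpk hkle
          (fun k' hk' hp' _ => hmaxk k' hk' hp')
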